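-- pv_equiv track=rewrite | github.com/yashsshah/ipl_fantasy_leaderboard_ys | scripts/sync_csvs_to_data_json.py | build_display_name_lookup
-- ===== SOURCE A (Python) =====
-- def clean(value: str | None) -> str | None:
--     if value is None:
--         return None
--     value = value.strip()
--     return value if value else None
--
-- def normalize_lookup_key(value: str | None) -> str | None:
--     normalized = clean(value)
--     return normalized.casefold() if normalized is not None else None
--
-- def build_display_name_lookup(participants_rows: list[dict[str, str]]) -> dict[str, str]:
--     lookup: dict[str, str] = {}
--     for row in participants_rows:
--         member_name = clean(row.get("LeagueMemberName"))
--         if member_name is None: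
--             continue
--
--         team_name = clean(row.get("LeagueTeamName"))
--         member_key = normalize_lookup_key(member_name)
--         team_key = normalize_lookup_key(team_name)
--
--         if team_key is not None:
--             lookup[team_key] = member_name
--         if member_key is not None:
--             lookup.setdefault(member_key, member_name)
--
--     return lookup
-- ===== SOURCE B (Python) =====
-- def build_display_name_lookup(participants_rows):
--     # Flatten rows to a stream of (key, name, is_team) entries, then compute
--     # key order and final values in separate passes and reassemble.
--     entries = []
--     for row in participants_rows:
--         name = row.get("LeagueMemberName")
--         if name is not None:
--             name = name.strip()
--         if not name:
--             continue
--         team = row.get("LeagueTeamName")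
--         if team is not None:
--             team = team.strip()
--         if team:
--             entries.append((team.casefold(), name, True))
--         entries.append((name.casefold(), name, False))
--     team_val = {k: n for (k, n, t) in entries if t}          # last team write wins
--     member_val = {}
--     for k, n, t in entries:
--         if not t and k not in member_val:
--             member_val[k] = n                                # first member write wins
--     order = list(dict.fromkeys(k for (k, _, _) in entries))  # first-appearance order
--     return {k: team_val[k] if k in team_val else member_val[k] for k in order}
-- ===== Notes on version B (the rewrite author's own statement) =====
-- stated objective: alternative
-- what changed: A interleaves dict insert/setdefault per row; B flattens the rows into a (key, name, is_team) entry stream and computes final values (last team write wins, else first member write) and first-appearance key order in separate passes, then reassembles the dict.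
import Mathlib
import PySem

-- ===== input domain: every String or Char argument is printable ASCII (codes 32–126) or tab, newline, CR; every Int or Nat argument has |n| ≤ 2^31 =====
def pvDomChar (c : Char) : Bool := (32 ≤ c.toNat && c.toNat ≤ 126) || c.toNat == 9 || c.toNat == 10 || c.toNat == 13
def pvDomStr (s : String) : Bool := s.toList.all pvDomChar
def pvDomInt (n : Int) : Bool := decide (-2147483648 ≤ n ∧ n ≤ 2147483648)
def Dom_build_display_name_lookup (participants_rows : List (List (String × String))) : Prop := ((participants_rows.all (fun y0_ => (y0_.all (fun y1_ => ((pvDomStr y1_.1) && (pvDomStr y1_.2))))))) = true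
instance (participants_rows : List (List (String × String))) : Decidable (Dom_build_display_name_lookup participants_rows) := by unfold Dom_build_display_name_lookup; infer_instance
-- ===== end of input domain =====

-- B restates A's interleaved dict-building as: flatten rows to a (key, name, is_team)
-- entry stream, then compute key order and final values in separate passes (alternative
-- decomposition, same cost).


-- ===== PORT A =====
-- clean(value): strip, empty → None
def pyClean (v : Option String) : Option String :=
  match v with
  | none => none
  | some s =>
    let t := PySem.Str.strip s
    if t = "" then none else some t

-- normalize_lookup_key(value)  (casefold ported as PySem.Str.lower: exact on the ASCII domain)
def pyNormKey (v : Option String) : Option String :=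
  match pyClean v with
  | none => none
  | some t => some (PySem.Str.lower t)

def build_display_name_lookup (participants_rows : List (List (String × String))) : List (String × String) :=
  (participants_rows.foldl (fun (lookup : PySem.Dict String String) row =>
    match pyClean ((PySem.Dict.mk row).get? "LeagueMemberName") with
    | none => lookup
    | some member_name =>
      let team_key := pyNormKey ((PySem.Dict.mk row).get? "LeagueTeamName")
      let member_key := pyNormKey (some member_name)
      let lookup1 := match team_key with
        | some tk => lookup.insert tk member_name
        | none => lookup
      match member_key with
      | some mk => lookup1.setdefault mk member_name
      | none => lookup1) PySem.Dict.empty).items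

-- ===== PORT B =====
-- the entries a single row appends to the stream in Source B's first loop
def bRowEntries (row : List (String × String)) : List (String × String × Bool) :=
  let name0 := match (PySem.Dict.mk row).get? "LeagueMemberName" with
    | some s => some (PySem.Str.strip s)
    | none => none
  match name0 with
  | none => []
  | some name =>
    if name = "" then []
    else
      let team0 := match (PySem.Dict.mk row).get? "LeagueTeamName" with
        | some s => some (PySem.Str.strip s)
        | none => none
      let te := match team0 with
        | some t => if t = "" then [] else [(PySem.Str.lower t, name, true)]
        | none => []
      te ++ [(PySem.Str.lower name, name, false)]

def build_display_name_lookup_alt (participants_rows : List (List (String × String))) : List (String × String) :=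
  let entries := participants_rows.foldl (fun es row => es ++ bRowEntries row) []
  let team_val := entries.foldl
    (fun (d : PySem.Dict String String) e => if e.2.2 then d.insert e.1 e.2.1 else d) PySem.Dict.empty
  let member_val := entries.foldl
    (fun (d : PySem.Dict String String) e =>
      if !e.2.2 && !(d.contains e.1) then d.insert e.1 e.2.1 else d) PySem.Dict.empty
  let order := PySem.List.dedup (entries.map (·.1))
  order.map (fun k => (k, match team_val.get? k with
    | some v => v
    | none => member_val.getD k ""))

-- ===== PRECONDITION & SPEC =====
def Spec_build_display_name_lookup (participants_rows : List (List (String × String))) (out : List (String × String)) : Prop := out = build_display_name_lookup_alt participants_rows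
instance (participants_rows : List (List (String × String))) (out : List (String × String)) : Decidable (Spec_build_display_name_lookup participants_rows out) := by unfold Spec_build_display_name_lookup; infer_instance

-- ===== CLAIM (what is proved, stated in full; the proofs are below) =====
def Claim_equal_build_display_name_lookup : Prop := ∀ (participants_rows : List (List (String × String))), Dom_build_display_name_lookup participants_rows → Spec_build_display_name_lookup participants_rows (build_display_name_lookup participants_rows)

-- ===== LEMMAS AND PROOFS =====

-- the three per-entry dict steps
def aStep (d : PySem.Dict String String) (e : String × String × Bool) : PySem.Dict String String :=
  if e.2.2 then d.insert e.1 e.2.1 else d.setdefault e.1 e.2.1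

def tStep (d : PySem.Dict String String) (e : String × String × Bool) : PySem.Dict String String :=
  if e.2.2 then d.insert e.1 e.2.1 else d

def mStep (d : PySem.Dict String String) (e : String × String × Bool) : PySem.Dict String String :=
  if !e.2.2 && !(d.contains e.1) then d.insert e.1 e.2.1 else d

def valOf (es : List (String × String × Bool)) (k : String) : String :=
  match (es.foldl tStep PySem.Dict.empty).get? k with
  | some v => v
  | none => (es.foldl mStep PySem.Dict.empty).getD k ""

def assemble (es : List (String × String × Bool)) : List (String × String) :=
  (PySem.List.dedup (es.map (·.1))).map (fun k => (k, valOf es k))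

theorem dropWhile_of_prefix {p : Char → Bool} {x u : List Char} (hx : x <+: u)
    (hu : u.dropWhile p = u) : x.dropWhile p = x := by
  cases x with
  | nil => simp
  | cons a xs =>
    obtain ⟨t, rfl⟩ := hx
    by_cases hpa : p a
    · exfalso
      rw [List.cons_append, List.dropWhile_cons, if_pos hpa] at hu
      have h1 := List.length_dropWhile_le p (xs ++ t)
      have h2 := congrArg List.length hu
      simp only [List.length_cons] at h2; omega
    · rw [List.dropWhile_cons, if_neg hpa]

theorem chars_strip_idem (l : List Char) :
    PySem.Chars.strip (PySem.Chars.strip l) = PySem.Chars.strip l := by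
  unfold PySem.Chars.strip PySem.Chars.rstrip PySem.Chars.lstrip
  set p := PySem.Chars.isspace
  set u := l.dropWhile p with hu
  have hui : u.dropWhile p = u := List.dropWhile_idempotent p l
  have hpre : (u.reverse.dropWhile p).reverse <+: u := by
    have h := List.dropWhile_suffix (l := u.reverse) p
    have := (List.reverse_prefix (l₁ := u.reverse.dropWhile p) (l₂ := u.reverse)).mpr h
    simpa using this
  rw [dropWhile_of_prefix hpre hui]
  simp [List.dropWhile_idempotent]

theorem strip_idem (s : String) : PySem.Str.strip (PySem.Str.strip s) = PySem.Str.strip s := by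
  simp [PySem.Str.strip, chars_strip_idem]

-- A's per-row update equals folding aStep over that row's entries
theorem row_step (d : PySem.Dict String String) (row : List (String × String)) :
    (match pyClean ((PySem.Dict.mk row).get? "LeagueMemberName") with
      | none => d
      | some member_name =>
        let team_key := pyNormKey ((PySem.Dict.mk row).get? "LeagueTeamName")
        let lookup1 := match team_key with
          | some tk => d.insert tk member_name
          | none => d
        match pyNormKey (some member_name) with
        | some mk => lookup1.setdefault mk member_name
        | none => lookup1) = (bRowEntries row).foldl aStep d := by
  unfold bRowEntries
  cases h : (PySem.Dict.mk row).get? "LeagueMemberName" with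
  | none => simp [pyClean]
  | some s =>
    by_cases ht : PySem.Str.strip s = ""
    · simp [pyClean, ht]
    · cases h2 : (PySem.Dict.mk row).get? "LeagueTeamName" with
      | none => simp [pyClean, pyNormKey, ht, strip_idem, aStep]
      | some u =>
        by_cases hu : PySem.Str.strip u = ""
        · simp [pyClean, pyNormKey, ht, hu, strip_idem, aStep]
        · simp [pyClean, pyNormKey, ht, hu, strip_idem, aStep]

theorem fold_aux (rows : List (List (String × String))) (d : PySem.Dict String String) :
    rows.foldl (fun (lookup : PySem.Dict String String) row =>
      match pyClean ((PySem.Dict.mk row).get? "LeagueMemberName") with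
      | none => lookup
      | some member_name =>
        let team_key := pyNormKey ((PySem.Dict.mk row).get? "LeagueTeamName")
        let member_key := pyNormKey (some member_name)
        let lookup1 := match team_key with
          | some tk => lookup.insert tk member_name
          | none => lookup
        match member_key with
        | some mk => lookup1.setdefault mk member_name
        | none => lookup1) d = (rows.flatMap bRowEntries).foldl aStep d := by
  induction rows generalizing d with
  | nil => rfl
  | cons r rs ih =>
    rw [List.foldl_cons, List.flatMap_cons, List.foldl_append, ih, row_step]

theorem fold_eq_entries (rows : List (List (String × String))) :
    build_display_name_lookup rows = ((rows.flatMap bRowEntries).foldl aStep PySem.Dict.empty).items := by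
  unfold build_display_name_lookup
  rw [fold_aux]

theorem dedup_snoc (l : List String) (x : String) :
    PySem.List.dedup (l ++ [x]) =
      if x ∈ l then PySem.List.dedup l else PySem.List.dedup l ++ [x] := by
  simp only [PySem.List.dedup, PySem.Set.ofList, List.foldl_append, List.foldl_cons, List.foldl_nil,
    PySem.Set.add]
  by_cases hx : x ∈ l
  · rw [if_pos, if_pos hx]
    have : x ∈ PySem.Set.ofList l := (PySem.Set.mem_ofList l x).mpr hx
    simpa [PySem.Set.ofList] using this
  · rw [if_neg, if_neg hx]
    intro hc
    exact hx ((PySem.Set.mem_ofList l x).mp (by simpa [PySem.Set.ofList] using hc))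

-- every key of the stream lands in the team dict or the member dict
theorem mem_keys_iff (es : List (String × String × Bool)) (k : String) :
    k ∈ es.map (·.1) ↔
      ((es.foldl tStep PySem.Dict.empty).contains k = true ∨ (es.foldl mStep PySem.Dict.empty).contains k = true) := by
  induction es using List.reverseRecOn with
  | nil => simp [PySem.Dict.contains_empty]
  | append_singleton es e ih =>
    obtain ⟨k1, n, b⟩ := e
    rw [List.foldl_append, List.foldl_append]
    cases b with
    | true =>
      simp only [List.map_append, List.map_cons, List.map_nil, List.mem_append, List.mem_cons,
        List.not_mem_nil, or_false, List.foldl_cons, List.foldl_nil, tStep, mStep,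
        PySem.Dict.contains_insert, if_true, Bool.not_true, Bool.false_and,
        Bool.or_eq_true, beq_iff_eq, ih]
      tauto
    | false =>
      by_cases hm : (es.foldl mStep PySem.Dict.empty).contains k1
      · simp only [List.map_append, List.map_cons, List.map_nil, List.mem_append, List.mem_cons,
          List.not_mem_nil, or_false, List.foldl_cons, List.foldl_nil, tStep, mStep, hm,
          Bool.not_false, Bool.not_true, Bool.true_and, Bool.false_eq_true, if_false, ih]
        have hk1 : k = k1 → (es.foldl mStep PySem.Dict.empty).contains k = true := by
          rintro rfl; exact hm
        tauto
      · simp only [List.map_append, List.map_cons, List.map_nil, List.mem_append, List.mem_cons,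
          List.not_mem_nil, or_false, List.foldl_cons, List.foldl_nil, tStep, mStep,
          Bool.not_false, Bool.true_and, Bool.false_eq_true, if_false, hm, Bool.not_false,
          if_true, PySem.Dict.contains_insert, Bool.or_eq_true, beq_iff_eq, ih]
        tauto

theorem main_items (es : List (String × String × Bool)) :
    (es.foldl aStep PySem.Dict.empty).items = assemble es := by
  induction es using List.reverseRecOn with
  | nil => rfl
  | append_singleton es e ih =>
    obtain ⟨k, n, b⟩ := e
    rw [List.foldl_append, List.foldl_cons, List.foldl_nil]
    have hcont : ∀ k', (es.foldl aStep PySem.Dict.empty).contains k' = true ↔ k' ∈ es.map (·.1) := by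
      intro k'
      rw [PySem.Dict.contains_iff_mem_keys]
      simp only [PySem.Dict.keys, ih, assemble, List.map_map]
      simp
    have hmap : (es ++ [(k, n, b)]).map (fun x => x.1) = es.map (fun x => x.1) ++ [k] := by
      simp
    cases b with
    | true =>
      have hval : ∀ k', valOf (es ++ [(k, n, true)]) k' = if k' = k then n else valOf es k' := by
        intro k'
        unfold valOf
        rw [List.foldl_append, List.foldl_append]
        simp only [List.foldl_cons, List.foldl_nil, tStep, mStep, if_true, Bool.not_true,
          Bool.false_and, Bool.false_eq_true, if_false]
        by_cases hk' : k' = k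
        · subst hk'; rw [PySem.Dict.get?_insert_self]; simp
        · rw [PySem.Dict.get?_insert_of_ne _ _ hk']; simp [hk']
      show ((es.foldl aStep PySem.Dict.empty).insert k n).items = assemble (es ++ [(k, n, true)])
      unfold assemble
      rw [hmap, dedup_snoc]
      by_cases hk : k ∈ es.map (·.1)
      · rw [if_pos hk, PySem.Dict.items_insert_of_contains _ _ ((hcont k).mpr hk), ih]
        unfold assemble
        rw [List.map_map]
        refine List.map_congr_left ?_
        intro k' hk'
        simp only [Function.comp_apply, hval]
        by_cases hkk : k' = k
        · subst hkk; simp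
        · simp [hkk]
      · rw [if_neg hk,
          PySem.Dict.items_insert_of_not_contains _ _ (by
            have : ¬ (es.foldl aStep PySem.Dict.empty).contains k = true := fun h => hk ((hcont k).mp h)
            exact Bool.not_eq_true _ |>.mp this), ih, List.map_append]
        unfold assemble
        congr 1
        · refine List.map_congr_left ?_
          intro k' hk'
          have hmem : k' ∈ es.map (·.1) := (PySem.List.mem_dedup _ _).mp hk'
          have hkk : k' ≠ k := fun h => hk (h ▸ hmem)
          simp [hval, hkk]
        · simp [hval]
    | false =>
      have hT : (es ++ [(k, n, false)]).foldl tStep PySem.Dict.empty = es.foldl tStep PySem.Dict.empty := by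
        rw [List.foldl_append]; simp [tStep]
      show ((es.foldl aStep PySem.Dict.empty).setdefault k n).items = assemble (es ++ [(k, n, false)])
      by_cases hk : k ∈ es.map (·.1)
      · rw [PySem.Dict.setdefault_of_contains _ _ ((hcont k).mpr hk), ih]
        unfold assemble
        rw [hmap, dedup_snoc, if_pos hk]
        refine List.map_congr_left ?_
        intro k' hk'
        have hmem : k' ∈ es.map (·.1) := (PySem.List.mem_dedup _ _).mp hk'
        by_cases hm : (es.foldl mStep PySem.Dict.empty).contains k
        · have hM : (es ++ [(k, n, false)]).foldl mStep PySem.Dict.empty = es.foldl mStep PySem.Dict.empty := by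
            rw [List.foldl_append]; simp [mStep, hm]
          simp [valOf, hT, hM]
        · have hM : (es ++ [(k, n, false)]).foldl mStep PySem.Dict.empty
              = (es.foldl mStep PySem.Dict.empty).insert k n := by
            rw [List.foldl_append]
            simp only [List.foldl_cons, List.foldl_nil, mStep, Bool.not_false, Bool.true_and]
            simp [Bool.not_eq_true _ |>.mp hm]
          by_cases hkk : k' = k
          · subst hkk
            have hTc : (es.foldl tStep PySem.Dict.empty).contains k' = true := by
              rcases (mem_keys_iff es k').mp hk with h | h
              · exact h
              · exact absurd h hm
            have hsome : ((es.foldl tStep PySem.Dict.empty).get? k').isSome = true := by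
              rw [← PySem.Dict.contains_eq_isSome_get?]; exact hTc
            obtain ⟨v, hv⟩ := Option.isSome_iff_exists.mp hsome
            simp only [valOf, hT, hv]
          · simp [valOf, hT, hM, PySem.Dict.getD_insert_of_ne _ _ _ hkk]
      · have hnc : (es.foldl aStep PySem.Dict.empty).contains k = false := by
          have : ¬ (es.foldl aStep PySem.Dict.empty).contains k = true := fun h => hk ((hcont k).mp h)
          exact Bool.not_eq_true _ |>.mp this
        have hTM := mem_keys_iff es k
        have hTc : (es.foldl tStep PySem.Dict.empty).contains k = false := by
          by_cases h : (es.foldl tStep PySem.Dict.empty).contains k = true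
          · exact absurd (hTM.mpr (Or.inl h)) hk
          · exact Bool.not_eq_true _ |>.mp h
        have hMc : (es.foldl mStep PySem.Dict.empty).contains k = false := by
          by_cases h : (es.foldl mStep PySem.Dict.empty).contains k = true
          · exact absurd (hTM.mpr (Or.inr h)) hk
          · exact Bool.not_eq_true _ |>.mp h
        have hM : (es ++ [(k, n, false)]).foldl mStep PySem.Dict.empty
            = (es.foldl mStep PySem.Dict.empty).insert k n := by
          rw [List.foldl_append]
          simp [mStep, hMc]
        rw [PySem.Dict.setdefault_of_not_contains _ _ hnc,
          PySem.Dict.items_insert_of_not_contains _ _ hnc, ih]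
        unfold assemble
        rw [hmap, dedup_snoc, if_neg hk, List.map_append]
        congr 1
        · refine List.map_congr_left ?_
          intro k' hk'
          have hmem : k' ∈ es.map (·.1) := (PySem.List.mem_dedup _ _).mp hk'
          have hkk : k' ≠ k := fun h => hk (h ▸ hmem)
          simp [valOf, hT, hM,
            PySem.Dict.getD_insert_of_ne _ _ _ hkk]
        · have hTn : (es.foldl tStep PySem.Dict.empty).get? k = none :=
            (PySem.Dict.get?_eq_none_iff_contains _ _).mpr hTc
          simp [valOf, hT, hM, hTn]

-- ===== VERDICT (by name: the statement is the Claim_ definition above) =====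
theorem build_display_name_lookup_spec : Claim_equal_build_display_name_lookup := by
  intro rows _
  unfold Spec_build_display_name_lookup build_display_name_lookup_alt
  rw [fold_eq_entries, main_items]
  rw [PySem.List.foldl_append_eq_flatMap bRowEntries rows []]
  rfl
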